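-- pv_equiv track=rewrite | github.com/karelbemelmans/adventofcode | 2024/09/entry.py | compact2
-- ===== SOURCE A (Python) =====
-- from collections import deque
-- from itertools import groupby
-- from functools import reduce
--
-- def compact2(data):
--
--     # Split our array into groups with the same value aka file
--     G = deque([list(grp) for k, grp in groupby(data)])
--
--     k = len(G)
--
--     # This loop is ok since we need to try to move every word only once
--     # So there is no problem if there is still things to optimize in a 2nd or fruther pass
--     while True and k >= 0:
--         k -= 1
--         last = G[k]
--
--         # We skip empty groups
--         if last.count("."):
--             continue
--
--         for j, word in enumerate(G):
--
--             # Does it fit here AND it's on the left side were it currently is?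
--             if word.count(".") >= len(last) and j < k:
--
--                 # Add the 1 or 2 new items, depending how long the word is
--                 diff = len(word) - len(last)
--                 if diff:
--                     G[j] = ["."] * (len(word) - len(last))
--                     G.insert(j, last)
--
--                     G[k+1] = ["."] * len(last)
--
--                     # Our list has now increased with 1 item
--                     k += 1
--
--                 # We can replace a while set of dots with our word
--                 else:
--                     G[j] = last
--                     G[k] = ["."] * len(last)
--
--                 # Move on the the next word
--                 break
--
--     G = list(reduce(lambda x, y: x + y, G, []))
--     return G
-- ===== SOURCE B (Python) =====
-- def _claim(free, k, ln):
--     # leftmost free slot strictly left of slot k with capacity >= ln; shrink it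
--     for t in range(len(free)):
--         i, r = free[t]
--         if i >= k:
--             return free, None
--         if r >= ln:
--             return free[:t] + [(i, r - ln)] + free[t+1:], i
--     return free, None
--
--
-- def compact2(data):
--     # run-length encode into (label, length) segments
--     segs = []
--     for x in data:
--         if segs and segs[-1][0] == x:
--             segs[-1] = (x, segs[-1][1] + 1)
--         else:
--             segs.append((x, 1))
--     # free spans: (slot index, remaining capacity), in slot order
--     free = [(i, ln) for i, (lab, ln) in enumerate(segs) if lab == "."]
--     placed = []   # (target slot, label, length) in chronological order
--     movedk = []   # slots whose file was moved away
--     for k in range(len(segs) - 1, -1, -1):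
--         lab, ln = segs[k]
--         if lab == ".":
--             continue
--         free, slot = _claim(free, k, ln)
--         if slot is not None:
--             placed.append((slot, lab, ln))
--             movedk.append(k)
--     rem = dict(free)
--     out = []
--     for k, (lab, ln) in enumerate(segs):
--         if lab == ".":
--             for i, l2, n2 in placed:
--                 if i == k:
--                     out += [l2] * n2
--             out += ["."] * rem[k]
--         elif k in movedk:
--             out += ["."] * ln
--         else:
--             out += [lab] * ln
--     return out
-- ===== Notes on version B (the rewrite author's own statement) =====
-- stated objective: faster
-- what changed: Replaces A's destructive deque-of-element-lists simulation (groupby lists, index bookkeeping, splice-inserts, and re-scanning of already-moved groups) by a single right-to-left pass over a run-length encoding: a list of free spans with remaining capacities is shrunk in place, each original file is placed at most once, and the output is assembled per original slot at the end; Pre_ only excludes the empty list, on which A raises IndexError (G[-1] of an empty deque) while B returns [].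
-- outside the precondition, e.g. on compact2([]): A raises IndexError, B returns []
import Mathlib
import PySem

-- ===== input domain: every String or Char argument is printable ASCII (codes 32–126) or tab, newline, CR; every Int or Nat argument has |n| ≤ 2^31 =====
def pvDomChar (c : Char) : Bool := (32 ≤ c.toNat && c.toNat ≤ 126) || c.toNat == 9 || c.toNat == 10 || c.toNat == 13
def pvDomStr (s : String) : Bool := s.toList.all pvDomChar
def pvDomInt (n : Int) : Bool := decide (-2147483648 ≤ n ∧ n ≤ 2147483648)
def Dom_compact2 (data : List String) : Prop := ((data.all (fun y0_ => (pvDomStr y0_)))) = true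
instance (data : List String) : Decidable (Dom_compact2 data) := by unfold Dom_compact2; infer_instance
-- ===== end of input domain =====

-- B replaces A's deque-of-element-lists simulation by one right-to-left pass over a
-- run-length encoding with a shrinking free-span list (measurably faster by constant factors).

-- ===== PORT A =====

def pvDots (n : Nat) : List String := List.replicate n "."

-- itertools.groupby: runs of adjacent equal elements, as lists
def pvGroupRun (cur : String) (acc : List String) : List String → List (List String)
  | [] => [acc.reverse]
  | y :: ys => if y = cur then pvGroupRun cur (y :: acc) ys else acc.reverse :: pvGroupRun y [y] ys

def pvGroupby : List String → List (List String)
  | [] => []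
  | x :: xs => pvGroupRun x [x] xs

-- A's inner 'for j, word in enumerate(G): if word.count(".") >= len(last) and j < k: … break'
def pvFindMove : List (List String) → Nat → Int → Nat → Option (Nat × List String)
  | [], _, _, _ => none
  | w :: ws, L, k, j => if L ≤ w.count "." ∧ (j : Int) < k then some (j, w) else pvFindMove ws L k (j + 1)

-- A's 'while True and k >= 0' loop; fuel 2*len(data)+4 strictly exceeds the number of
-- iterations (each iteration decrements k except inserts, bounded by the dot count)
def pvALoop : Nat → List (List String) → Int → List (List String)
  | 0, G, _ => G
  | fuel + 1, G, k =>
    if 0 ≤ k then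
      let k' := k - 1
      match PySem.List.pyGet? G k' with
      | none => G   -- IndexError (only on empty G, excluded by Pre_)
      | some last =>
        if last.count "." ≠ 0 then pvALoop fuel G k'
        else
          match pvFindMove G last.length k' 0 with
          | none => pvALoop fuel G k'
          | some (j, word) =>
            let diff := word.length - last.length
            if diff ≠ 0 then
              pvALoop fuel (((G.set j (pvDots diff)).insertIdx j last).set (k'.toNat + 1) (pvDots last.length)) (k' + 1)
            else
              pvALoop fuel ((G.set j last).set k'.toNat (pvDots last.length)) k'
    else G

def compact2 (data : List String) : List String :=
  let G := pvGroupby data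
  (pvALoop (2 * data.length + 4) G (G.length : Int)).flatten

-- ===== PORT B =====

-- Source B: run-length encoding built by appending to segs
def pvRleStep (segs : List (String × Nat)) (x : String) : List (String × Nat) :=
  match segs.getLast? with
  | some (lab, n) => if lab = x then segs.dropLast ++ [(x, n + 1)] else segs ++ [(x, 1)]
  | none => [(x, 1)]

def pvSegs (data : List String) : List (String × Nat) := data.foldl pvRleStep []

-- Source B: free = [(i, ln) for i, (lab, ln) in enumerate(segs) if lab == "."]
def pvFreeInit : Nat → List (String × Nat) → List (Nat × Nat)
  | _, [] => []
  | i, (lab, ln) :: rest => if lab = "." then (i, ln) :: pvFreeInit (i + 1) rest else pvFreeInit (i + 1) rest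

-- Source B: _claim(free, k, ln)
def pvClaim : List (Nat × Nat) → Nat → Nat → (List (Nat × Nat) × Option Nat)
  | [], _, _ => ([], none)
  | (i, r) :: rest, k, ln =>
    if k ≤ i then ((i, r) :: rest, none)
    else if ln ≤ r then ((i, r - ln) :: rest, some i)
    else
      let res := pvClaim rest k ln
      ((i, r) :: res.1, res.2)

-- Source B: for k in range(len(segs)-1, -1, -1): …   (counter k+1 processes slot k)
def pvBLoop (segs : List (String × Nat)) : Nat → List (Nat × Nat) → List (Nat × String × Nat) → List Nat → (List (Nat × Nat) × List (Nat × String × Nat) × List Nat)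
  | 0, free, placed, moved => (free, placed, moved)
  | k + 1, free, placed, moved =>
    match segs[k]? with
    | none => (free, placed, moved)   -- unreachable: counter starts at len(segs)
    | some (lab, ln) =>
      if lab = "." then pvBLoop segs k free placed moved
      else
        let c := pvClaim free k ln
        match c.2 with
        | none => pvBLoop segs k c.1 placed moved
        | some i => pvBLoop segs k c.1 (placed ++ [(i, lab, ln)]) (moved ++ [k])

-- Source B: the final output-assembly loop over enumerate(segs)
-- (rem[k] lookup: every "." slot has an entry in free, so the default 0 is unreachable)
def pvOutFrom (free : List (Nat × Nat)) (placed : List (Nat × String × Nat)) (moved : List Nat) : Nat → List (String × Nat) → List String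
  | _, [] => []
  | k, (lab, ln) :: rest =>
    (if lab = "." then
      ((placed.filter (fun p => p.1 = k)).flatMap (fun p => List.replicate p.2.2 p.2.1))
        ++ List.replicate (match free.find? (fun q => q.1 = k) with | some q => q.2 | none => 0) "."
    else if moved.contains k then List.replicate ln "."
    else List.replicate ln lab) ++ pvOutFrom free placed moved (k + 1) rest

def compact2_alt (data : List String) : List String :=
  let segs := pvSegs data
  let st := pvBLoop segs segs.length (pvFreeInit 0 segs) [] []
  pvOutFrom st.1 st.2.1 st.2.2 0 segs

-- ===== PRECONDITION & SPEC =====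

-- Pre_ excludes only the empty list, on which A raises IndexError (G[-1] of an empty deque).
def Pre_compact2 (data : List String) : Prop := data ≠ []
instance (data : List String) : Decidable (Pre_compact2 data) := by unfold Pre_compact2; infer_instance

def pvWitness_compact2 : List String := ["0", "0", ".", "1"]

def Spec_compact2 (data : List String) (out : List String) : Prop := out = compact2_alt data
instance (data : List String) (out : List String) : Decidable (Spec_compact2 data out) := by unfold Spec_compact2; infer_instance

-- ===== CLAIM (what is proved, stated in full; the proofs are below) =====
def Claim_equal_compact2 : Prop := ∀ (data : List String), Dom_compact2 data → Pre_compact2 data → Spec_compact2 data (compact2 data)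

-- ===== LEMMAS AND PROOFS =====

-- proof-side machinery: a group-level rendering of B's state, equal at every step to A's deque

-- indices of the "." slots of segs, from offset i
def pvFreeIdx : Nat → List (String × Nat) → List Nat
  | _, [] => []
  | i, (lab, _) :: rest => if lab = "." then i :: pvFreeIdx (i + 1) rest else pvFreeIdx (i + 1) rest

-- the groups a single slot contributes to A's deque, given B's state
def pvSlotRender (free : List (Nat × Nat)) (placed : List (Nat × String × Nat)) (moved : List Nat) (k : Nat) (lab : String) (ln : Nat) : List (List String) :=
  if lab = "." then
    (placed.filter (fun p => p.1 = k)).map (fun p => List.replicate p.2.2 p.2.1)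
      ++ (match free.find? (fun q => q.1 = k) with
          | some q => if q.2 = 0 then [] else [pvDots q.2]
          | none => [])
  else if moved.contains k then [pvDots ln]
  else [List.replicate ln lab]

def pvRender (free : List (Nat × Nat)) (placed : List (Nat × String × Nat)) (moved : List Nat) : Nat → List (String × Nat) → List (List String)
  | _, [] => []
  | k, (lab, ln) :: rest => pvSlotRender free placed moved k lab ln ++ pvRender free placed moved (k + 1) rest

def pvPlacedLen (placed : List (Nat × String × Nat)) (i : Nat) : Nat :=
  ((placed.filter (fun p => p.1 = i)).map (fun p => p.2.2)).sum

def pvLens (segs : List (String × Nat)) : Nat := (segs.map Prod.snd).sum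

-- the loop invariant tying B's state to the original segments, pointer at slot k
def pvInv (segs : List (String × Nat)) (k : Nat) (free : List (Nat × Nat)) (placed : List (Nat × String × Nat)) (moved : List Nat) : Prop :=
  free.map Prod.fst = pvFreeIdx 0 segs
  ∧ (∀ p ∈ free, ∀ q ∈ placed, p.1 < q.1 → p.2 < q.2.2)
  ∧ (∀ q ∈ placed, q.2.1 ≠ "." ∧ 1 ≤ q.2.2)
  ∧ (∀ m ∈ moved, k ≤ m)
  ∧ (∀ p ∈ free, ∀ L, segs[p.1]? = some (".", L) → pvPlacedLen placed p.1 + p.2 ≤ L)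

-- ---- small facts ----

theorem pvRender_append (free : List (Nat × Nat)) (placed : List (Nat × String × Nat)) (moved : List Nat) (xs ys : List (String × Nat)) (i : Nat) :
    pvRender free placed moved i (xs ++ ys) = pvRender free placed moved i xs ++ pvRender free placed moved (i + xs.length) ys := by
  induction xs generalizing i with
  | nil => simp [pvRender]
  | cons hd tl ih =>
    obtain ⟨lab, ln⟩ := hd
    simp only [List.cons_append, pvRender, ih, List.length_cons, List.append_assoc]
    have h : i + (tl.length + 1) = i + 1 + tl.length := by omega
    rw [h]

theorem pvOutFrom_eq_flatten (free : List (Nat × Nat)) (placed : List (Nat × String × Nat)) (moved : List Nat) (i : Nat) (xs : List (String × Nat)) :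
    pvOutFrom free placed moved i xs = (pvRender free placed moved i xs).flatten := by
  induction xs generalizing i with
  | nil => simp [pvOutFrom, pvRender]
  | cons hd tl ih =>
    obtain ⟨lab, ln⟩ := hd
    simp only [pvOutFrom, pvRender, List.flatten_append, ih]
    congr 1
    by_cases h : lab = "."
    · simp only [h, pvSlotRender]
      cases hf : free.find? (fun q => q.1 = i) with
      | none => simp [List.flatMap_def]
      | some q =>
        by_cases hq : q.2 = 0
        · simp [List.flatMap_def, hq]
        · simp [List.flatMap_def, hq, pvDots]
    · simp only [pvSlotRender, if_neg h]
      split <;> simp [pvDots]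

theorem pvAcc_reverse (cur : String) (acc : List String) (h : ∀ a ∈ acc, a = cur) :
    acc.reverse = List.replicate acc.length cur := by
  have : acc = List.replicate acc.length cur := List.eq_replicate_of_mem h
  rw [this, List.reverse_replicate, List.length_replicate]

theorem pvRleBridge : ∀ (data : List String) (segs : List (String × Nat)) (cur : String) (acc : List String),
    acc ≠ [] → (∀ a ∈ acc, a = cur) →
    (data.foldl pvRleStep (segs ++ [(cur, acc.length)])).map (fun p => List.replicate p.2 p.1)
      = segs.map (fun p => List.replicate p.2 p.1) ++ pvGroupRun cur acc data := by
  intro data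
  induction data with
  | nil =>
    intro segs cur acc hne hall
    simp [pvGroupRun, pvAcc_reverse cur acc hall]
  | cons x xs ih =>
    intro segs cur acc hne hall
    simp only [List.foldl_cons, pvGroupRun]
    have hstep : pvRleStep (segs ++ [(cur, acc.length)]) x =
        if cur = x then segs ++ [(x, acc.length + 1)] else (segs ++ [(cur, acc.length)]) ++ [(x, 1)] := by
      simp [pvRleStep]
    by_cases hx : x = cur
    · subst hx
      rw [hstep, if_pos rfl, if_pos rfl]
      have := ih segs x (x :: acc) (by simp)
        (by intro a ha; rw [List.mem_cons] at ha
            cases ha with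
            | inl h => exact h
            | inr h => exact hall a h)
      simpa using this
    · rw [hstep, if_neg (fun hc => hx hc.symm), if_neg hx]
      have := ih (segs ++ [(cur, acc.length)]) x [x] (by simp) (by simp)
      simp only [List.length_cons, List.length_nil, Nat.zero_add] at this ⊢
      rw [this, List.map_append]
      simp [pvAcc_reverse cur acc hall]

theorem pvGroupby_eq_map (data : List String) :
    pvGroupby data = (pvSegs data).map (fun p => List.replicate p.2 p.1) := by
  cases data with
  | nil => simp [pvGroupby, pvSegs]
  | cons x xs =>
    have h : pvSegs (x :: xs) = xs.foldl pvRleStep ([] ++ [(x, ([x] : List String).length)]) := by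
      simp [pvSegs, pvRleStep]
    rw [pvGroupby, h, pvRleBridge xs [] x [x] (by simp) (by simp)]
    simp

theorem pvRleStep_wf (segs : List (String × Nat)) (x : String) (h : ∀ p ∈ segs, 1 ≤ p.2) :
    ∀ p ∈ pvRleStep segs x, 1 ≤ p.2 := by
  intro p hp
  cases hl : segs.getLast? with
  | none => simp only [pvRleStep, hl] at hp; simp at hp; simp [hp]
  | some q =>
    obtain ⟨lab, n⟩ := q
    simp only [pvRleStep, hl] at hp
    split at hp
    · rcases List.mem_append.1 hp with h1 | h1
      · exact h p (List.dropLast_subset _ h1)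
      · simp at h1; simp [h1]
    · rcases List.mem_append.1 hp with h1 | h1
      · exact h p h1
      · simp at h1; simp [h1]

theorem pvSegs_wf (data : List String) : ∀ p ∈ pvSegs data, 1 ≤ p.2 := by
  suffices h : ∀ (l : List String) (segs : List (String × Nat)), (∀ p ∈ segs, 1 ≤ p.2) →
      ∀ p ∈ l.foldl pvRleStep segs, 1 ≤ p.2 by
    exact h data [] (by simp)
  intro l
  induction l with
  | nil => intro segs h p hp; exact h p hp
  | cons x xs ih => intro segs h p hp; exact ih _ (pvRleStep_wf segs x h) p hp

theorem pvLens_append (a b : List (String × Nat)) : pvLens (a ++ b) = pvLens a + pvLens b := by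
  simp [pvLens]

theorem pvLens_step (segs : List (String × Nat)) (x : String) : pvLens (pvRleStep segs x) = pvLens segs + 1 := by
  cases hl : segs.getLast? with
  | none =>
    have h0 : segs = [] := List.getLast?_eq_none_iff.1 hl
    subst h0; simp [pvRleStep, pvLens]
  | some q =>
    obtain ⟨lab, n⟩ := q
    have hne : segs ≠ [] := by intro h; subst h; simp at hl
    have hsegs : segs.dropLast ++ [(lab, n)] = segs := by
      have h1 := List.dropLast_append_getLast hne
      have h2 : segs.getLast hne = (lab, n) := by
        have h3 := List.getLast?_eq_some_getLast hne
        rw [h3] at hl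
        exact Option.some_inj.1 hl
      rw [h2] at h1
      exact h1
    simp only [pvRleStep, hl]
    split
    · rw [← hsegs, pvLens_append, pvLens_append]; simp [pvLens]; omega
    · rw [pvLens_append]; simp [pvLens]

theorem pvLens_segs (data : List String) : pvLens (pvSegs data) = data.length := by
  suffices h : ∀ (l : List String) (segs : List (String × Nat)),
      pvLens (l.foldl pvRleStep segs) = pvLens segs + l.length by
    have := h data []
    simpa [pvLens] using this
  intro l
  induction l with
  | nil => intro segs; simp
  | cons x xs ih => intro segs; rw [List.foldl_cons, ih, pvLens_step, List.length_cons]; omega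

theorem mem_pvFreeInit (xs : List (String × Nat)) : ∀ (i : Nat) (p : Nat × Nat),
    p ∈ pvFreeInit i xs ↔ i ≤ p.1 ∧ xs[p.1 - i]? = some (".", p.2) := by
  induction xs with
  | nil => intro i p; simp [pvFreeInit]
  | cons hd tl ih =>
    intro i p
    obtain ⟨lab, ln⟩ := hd
    obtain ⟨a, b⟩ := p
    by_cases h : lab = "."
    · simp only [pvFreeInit, if_pos h, List.mem_cons, ih (i + 1)]
      constructor
      · rintro (heq | ⟨h1, h2⟩)
        · obtain ⟨rfl, rfl⟩ := Prod.mk.injEq .. ▸ heq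
          refine ⟨le_refl _, ?_⟩
          simp [h]
        · refine ⟨by omega, ?_⟩
          have he : a - i = (a - (i + 1)) + 1 := by omega
          rw [he, List.getElem?_cons_succ]
          exact h2
      · rintro ⟨h1, h2⟩
        by_cases hp : a = i
        · subst hp
          simp only [Nat.sub_self, List.getElem?_cons_zero, Option.some_inj, Prod.mk.injEq] at h2
          left; rw [h2.2]
        · right
          have he : a - i = (a - (i + 1)) + 1 := by omega
          rw [he, List.getElem?_cons_succ] at h2
          exact ⟨by omega, h2⟩
    · simp only [pvFreeInit, if_neg h, ih (i + 1)]
      constructor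
      · rintro ⟨h1, h2⟩
        refine ⟨by omega, ?_⟩
        have he : a - i = (a - (i + 1)) + 1 := by omega
        rw [he, List.getElem?_cons_succ]
        exact h2
      · rintro ⟨h1, h2⟩
        by_cases hp : a = i
        · subst hp
          simp only [Nat.sub_self, List.getElem?_cons_zero, Option.some_inj, Prod.mk.injEq] at h2
          exact absurd h2.1 h
        · have he : a - i = (a - (i + 1)) + 1 := by omega
          rw [he, List.getElem?_cons_succ] at h2
          exact ⟨by omega, h2⟩

theorem pvFreeInit_map_fst (xs : List (String × Nat)) : ∀ (i : Nat),
    (pvFreeInit i xs).map Prod.fst = pvFreeIdx i xs := by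
  induction xs with
  | nil => intro i; simp [pvFreeInit, pvFreeIdx]
  | cons hd tl ih =>
    intro i
    obtain ⟨lab, ln⟩ := hd
    by_cases h : lab = "." <;> simp [pvFreeInit, pvFreeIdx, h, ih (i + 1)]

theorem pvFreeIdx_ge (xs : List (String × Nat)) : ∀ (i j : Nat), j ∈ pvFreeIdx i xs → i ≤ j := by
  induction xs with
  | nil => intro i j h; simp [pvFreeIdx] at h
  | cons hd tl ih =>
    intro i j h
    obtain ⟨lab, ln⟩ := hd
    by_cases hl : lab = "."
    · simp only [pvFreeIdx, if_pos hl, List.mem_cons] at h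
      rcases h with rfl | h
      · exact le_refl _
      · have := ih (i + 1) j h; omega
    · simp only [pvFreeIdx, if_neg hl] at h
      have := ih (i + 1) j h; omega

theorem pvFreeIdx_pairwise (xs : List (String × Nat)) : ∀ (i : Nat),
    (pvFreeIdx i xs).Pairwise (· < ·) := by
  induction xs with
  | nil => intro i; simp [pvFreeIdx]
  | cons hd tl ih =>
    intro i
    obtain ⟨lab, ln⟩ := hd
    by_cases hl : lab = "."
    · simp only [pvFreeIdx, if_pos hl]
      exact List.Pairwise.cons (fun j hj => by have := pvFreeIdx_ge tl (i + 1) j hj; omega) (ih (i + 1))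
    · simp only [pvFreeIdx, if_neg hl]
      exact ih (i + 1)

theorem mem_pvFreeIdx (xs : List (String × Nat)) (i j : Nat) :
    j ∈ pvFreeIdx i xs ↔ i ≤ j ∧ ∃ L, xs[j - i]? = some (".", L) := by
  rw [← pvFreeInit_map_fst, List.mem_map]
  constructor
  · rintro ⟨p, hp, rfl⟩
    have := (mem_pvFreeInit xs i p).1 hp
    exact ⟨this.1, p.2, this.2⟩
  · rintro ⟨h1, L, h2⟩
    exact ⟨(j, L), (mem_pvFreeInit xs i (j, L)).2 ⟨h1, h2⟩, rfl⟩

theorem pvFreeInit_find (xs : List (String × Nat)) : ∀ (i k : Nat) (lab : String) (ln : Nat),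
    xs[k]? = some (lab, ln) → lab = "." →
    (pvFreeInit i xs).find? (fun q => q.1 = i + k) = some (i + k, ln) := by
  induction xs with
  | nil => intro i k lab ln h; simp at h
  | cons hd tl ih =>
    intro i k lab ln h hl
    obtain ⟨l0, n0⟩ := hd
    cases k with
    | zero =>
      simp only [List.getElem?_cons_zero, Option.some_inj, Prod.mk.injEq] at h
      obtain ⟨rfl, rfl⟩ := h
      simp only [pvFreeInit, if_pos hl]
      simp [List.find?]
    | succ k' =>
      rw [List.getElem?_cons_succ] at h
      have hrec := ih (i + 1) k' lab ln h hl
      by_cases h0 : l0 = "."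
      · simp only [pvFreeInit, if_pos h0]
        rw [List.find?_cons_of_neg (by simp)]
        rw [show i + (k' + 1) = (i + 1) + k' by omega]
        exact hrec
      · simp only [pvFreeInit, if_neg h0]
        rw [show i + (k' + 1) = (i + 1) + k' by omega]
        exact hrec

theorem pvRender_init_aux (free : List (Nat × Nat)) : ∀ (xs : List (String × Nat)) (i : Nat),
    (∀ j lab ln, xs[j]? = some (lab, ln) → lab = "." → free.find? (fun q => q.1 = i + j) = some (i + j, ln) ∧ 1 ≤ ln) →
    pvRender free [] [] i xs = xs.map (fun p => List.replicate p.2 p.1) := by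
  intro xs
  induction xs with
  | nil => intro i h; simp [pvRender]
  | cons hd tl ih =>
    intro i h
    obtain ⟨lab, ln⟩ := hd
    have hslot : pvSlotRender free [] [] i lab ln = [List.replicate ln lab] := by
      by_cases hl : lab = "."
      · have h0 := h 0 lab ln (by simp) hl
        simp only [pvSlotRender, if_pos hl, List.filter_nil, List.map_nil, List.nil_append]
        rw [show i = i + 0 by omega, h0.1]
        have hn : ln ≠ 0 := by omega
        simp [hn, pvDots, hl]
      · simp [pvSlotRender, hl]
    rw [pvRender, hslot, List.map_cons, List.singleton_append]
    congr 1
    exact ih (i + 1) (fun j lab2 ln2 hj hl2 => by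
      have := h (j + 1) lab2 ln2 (by rw [← hj]; simp) hl2
      rwa [show i + (j + 1) = (i + 1) + j by omega] at this)

theorem pvRender_init (data : List String) :
    pvGroupby data = pvRender (pvFreeInit 0 (pvSegs data)) [] [] 0 (pvSegs data) := by
  rw [pvGroupby_eq_map]
  rw [pvRender_init_aux (pvFreeInit 0 (pvSegs data)) (pvSegs data) 0 (fun j lab ln hj hl => by
    constructor
    · have := pvFreeInit_find (pvSegs data) 0 j lab ln hj hl
      simpa using this
    · have hmem : (lab, ln) ∈ pvSegs data := List.mem_of_getElem? hj
      exact pvSegs_wf data _ hmem)]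

-- ---- findMove characterisation ----

theorem pvFindMove_none (L : Nat) (k : Int) :
    ∀ (G : List (List String)) (j0 : Nat), (∀ m w, G[m]? = some w → ((j0 + m : Nat) : Int) < k → w.count "." < L) →
    pvFindMove G L k j0 = none := by
  intro G
  induction G with
  | nil => intro j0 h; rfl
  | cons w ws ih =>
    intro j0 h
    have hcond : ¬ (L ≤ w.count "." ∧ ((j0 : Nat) : Int) < k) := by
      rintro ⟨h1, h2⟩
      have := h 0 w (by simp) (by simpa using h2)
      omega
    simp only [pvFindMove, if_neg hcond]
    exact ih (j0 + 1) (fun m v hv hlt => h (m + 1) v (by simpa using hv)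
      (by push_cast at hlt ⊢; omega))

theorem pvFindMove_found (g : List String) (L : Nat) (k : Int) :
    ∀ (P : List (List String)) (R : List (List String)) (j0 : Nat), (∀ v ∈ P, v.count "." < L) → L ≤ g.count "." →
    ((j0 + P.length : Nat) : Int) < k →
    pvFindMove (P ++ g :: R) L k j0 = some (j0 + P.length, g) := by
  intro P
  induction P with
  | nil =>
    intro R j0 hP hg hk
    simp only [List.nil_append, pvFindMove]
    rw [if_pos ⟨hg, by simpa using hk⟩]
    simp
  | cons v P' ih =>
    intro R j0 hP hg hk
    have hv : v.count "." < L := hP v (by simp)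
    have hc : ¬ (L ≤ v.count "." ∧ ((j0 : Nat) : Int) < k) := fun ⟨h1, _⟩ => by omega
    simp only [List.cons_append, pvFindMove, if_neg hc]
    have := ih R (j0 + 1) (fun u hu => hP u (by simp [hu])) hg
      (by simp only [List.length_cons] at hk; push_cast at hk ⊢; omega)
    rw [this]
    congr 2
    simp only [List.length_cons]; omega

-- every group rendered from slots whose free remainders are < L has fewer than L dots
theorem pvRender_count_lt (free : List (Nat × Nat)) (placed : List (Nat × String × Nat)) (moved : List Nat) (L : Nat)
    (hL : 1 ≤ L) :
    ∀ (xs : List (String × Nat)) (i : Nat),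
    (∀ q ∈ placed, q.2.1 ≠ ".") →
    (∀ t ∈ moved, ¬ (i ≤ t ∧ t < i + xs.length)) →
    (∀ p ∈ free, i ≤ p.1 → p.1 < i + xs.length → p.2 < L) →
    ∀ v ∈ pvRender free placed moved i xs, v.count "." < L := by
  intro xs
  induction xs with
  | nil => intro i _ _ _ v hv; simp [pvRender] at hv
  | cons hd tl ih =>
    intro i hplaced hmoved hfree v hv
    obtain ⟨lab, ln⟩ := hd
    rw [pvRender, List.mem_append] at hv
    rcases hv with hv | hv
    · by_cases hl : lab = "."
      · rw [pvSlotRender, if_pos hl, List.mem_append] at hv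
        rcases hv with hv | hv
        · rw [List.mem_map] at hv
          obtain ⟨q, hq, rfl⟩ := hv
          have hq2 := hplaced q (List.mem_of_mem_filter hq)
          have h0 : (List.replicate q.2.2 q.2.1).count "." = 0 := by
            rw [List.count_replicate]; simp [hq2]
          omega
        · cases hf : free.find? (fun q => q.1 = i) with
          | none => simp only [hf] at hv; simp at hv
          | some q =>
            simp only [hf] at hv
            have hqm := List.mem_of_find?_eq_some hf
            have hqp : q.1 = i := by simpa using List.find?_some hf
            have := hfree q hqm (by omega) (by simp; omega)
            by_cases hq0 : q.2 = 0
            · rw [if_pos hq0] at hv; simp at hv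
            · rw [if_neg hq0] at hv
              simp at hv
              rw [hv, pvDots, List.count_replicate]
              simpa using this
      · rw [pvSlotRender, if_neg hl] at hv
        by_cases hm : moved.contains i
        · exact absurd ⟨le_refl i, by simp only [List.length_cons]; omega⟩ (hmoved i (by simpa using hm))
        · rw [if_neg (by simpa using hm)] at hv
          simp at hv
          have h0 : (List.replicate ln lab).count "." = 0 := by
            rw [List.count_replicate]; simp [hl]
          rw [hv]; omega
    · exact ih (i + 1) hplaced
        (fun t ht hc => hmoved t ht (by simp at hc ⊢; omega))
        (fun p hp h1 h2 => hfree p hp (by omega) (by simp at h2 ⊢; omega)) v hv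

-- ---- pvClaim characterisation ----

theorem pvClaimNone (k ln : Nat) :
    ∀ (free : List (Nat × Nat)), (free.map Prod.fst).Pairwise (· < ·) →
    (pvClaim free k ln).2 = none →
    (pvClaim free k ln).1 = free ∧ ∀ p ∈ free, p.1 < k → p.2 < ln := by
  intro free
  induction free with
  | nil => intro _ _; exact ⟨rfl, by simp⟩
  | cons hd rest ih =>
    intro hpw hnone
    obtain ⟨i, r⟩ := hd
    rw [List.map_cons, List.pairwise_cons] at hpw
    by_cases h1 : k ≤ i
    · refine ⟨by simp [pvClaim, h1], ?_⟩
      intro p hp hpk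
      rcases List.mem_cons.1 hp with rfl | hp
      · simp at hpk; omega
      · have : i < p.1 := hpw.1 p.1 (List.mem_map_of_mem hp)
        omega
    · by_cases h2 : ln ≤ r
      · rw [pvClaim, if_neg h1, if_pos h2] at hnone
        simp at hnone
      · rw [pvClaim, if_neg h1, if_neg h2] at hnone
        simp only at hnone
        have := ih hpw.2 hnone
        refine ⟨?_, ?_⟩
        · simp only [pvClaim, if_neg h1, if_neg h2]
          simp [this.1]
        · intro p hp hpk
          rcases List.mem_cons.1 hp with rfl | hp
          · simpa using (by omega : r < ln)
          · exact this.2 p hp hpk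

theorem pvClaimSome (k ln : Nat) :
    ∀ (free : List (Nat × Nat)) (i : Nat), (pvClaim free k ln).2 = some i →
    ∃ pre r post, free = pre ++ (i, r) :: post ∧ (pvClaim free k ln).1 = pre ++ (i, r - ln) :: post ∧
      ln ≤ r ∧ i < k ∧ ∀ p ∈ pre, p.1 < k ∧ p.2 < ln := by
  intro free
  induction free with
  | nil => intro i h; simp [pvClaim] at h
  | cons hd rest ih =>
    intro i hsome
    obtain ⟨i0, r0⟩ := hd
    by_cases h1 : k ≤ i0
    · rw [pvClaim, if_pos h1] at hsome; simp at hsome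
    · by_cases h2 : ln ≤ r0
      · rw [pvClaim, if_neg h1, if_pos h2] at hsome
        simp at hsome
        subst hsome
        exact ⟨[], r0, rest, by simp, by simp [pvClaim, h1, h2], h2, by omega, by simp⟩
      · rw [pvClaim, if_neg h1, if_neg h2] at hsome
        simp only at hsome
        obtain ⟨pre, r, post, hfree, hres, hlr, hik, hpre⟩ := ih i hsome
        refine ⟨(i0, r0) :: pre, r, post, by simp [hfree], ?_, hlr, hik, ?_⟩
        · simp only [pvClaim, if_neg h1, if_neg h2]
          simp [hres]
        · intro p hp
          rcases List.mem_cons.1 hp with rfl | hp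
          · exact ⟨by omega, by omega⟩
          · exact hpre p hp

-- ---- single no-op iterations and block crossing ----

theorem pvALoop_noop (fuel : Nat) (G : List (List String)) (m : Nat) (w : List String) (hm : G[m]? = some w)
    (hw : w.count "." ≠ 0 ∨ (1 ≤ w.length ∧ ∀ v ∈ G.take m, v.count "." < w.length)) :
    pvALoop (fuel + 1) G ((m + 1 : Nat) : Int) = pvALoop fuel G (m : Int) := by
  have h0 : (0 : Int) ≤ ((m + 1 : Nat) : Int) := by positivity
  have hk : ((m + 1 : Nat) : Int) - 1 = ((m : Nat) : Int) := by push_cast; ring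
  have hget : PySem.List.pyGet? G ((m : Nat) : Int) = some w := by simp [hm]
  simp only [pvALoop, if_pos h0, hk, hget]
  by_cases hc : w.count "." ≠ 0
  · rw [if_pos hc]
  · rw [if_neg hc]
    rcases hw with hwl | hwr
    · exact absurd hwl hc
    · have hfm : pvFindMove G w.length ((m : Nat) : Int) 0 = none := by
        apply pvFindMove_none
        intro m' v hv hlt
        have hm' : m' < m := by
          have : ((0 + m' : Nat) : Int) < ((m : Nat) : Int) := hlt
          exact_mod_cast by push_cast at this; omega
        have hvmem : v ∈ G.take m := by
          have h2 : (G.take m)[m']? = some v := by rw [List.getElem?_take_of_lt hm']; exact hv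
          exact List.mem_of_getElem? h2
        exact hwr.2 v hvmem
      rw [hfm]

theorem pvCross : ∀ (M X Y : List (List String)) (fuel : Nat),
    (∀ p w, M[p]? = some w → w.count "." ≠ 0 ∨ (1 ≤ w.length ∧ ∀ v ∈ X ++ M.take p, v.count "." < w.length)) →
    M.length ≤ fuel →
    pvALoop fuel (X ++ M ++ Y) ((X.length + M.length : Nat) : Int) = pvALoop (fuel - M.length) (X ++ M ++ Y) ((X.length : Nat) : Int) := by
  intro M
  induction M using List.reverseRecOn with
  | nil => intro X Y fuel h hf; simp
  | append_singleton M' w ih =>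
    intro X Y fuel h hf
    obtain ⟨f, rfl⟩ : ∃ f, fuel = f + 1 := ⟨fuel - 1, by simp at hf; omega⟩
    have hGeq : X ++ (M' ++ [w]) ++ Y = X ++ M' ++ (w :: Y) := by simp
    have hidx : (X ++ (M' ++ [w]) ++ Y)[X.length + M'.length]? = some w := by
      rw [hGeq, show X.length + M'.length = (X ++ M').length by simp]
      simp
    have htake : (X ++ (M' ++ [w]) ++ Y).take (X.length + M'.length) = X ++ M' := by
      rw [hGeq, show X.length + M'.length = (X ++ M').length by simp, List.take_left]
    have hside := h M'.length w (by simp)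
    rw [show (M' ++ [w]).take M'.length = M' by simp [List.take_left']] at hside
    have hnoop := pvALoop_noop f (X ++ (M' ++ [w]) ++ Y) (X.length + M'.length) w hidx
      (by rcases hside with hl | hr
          · exact Or.inl hl
          · exact Or.inr ⟨hr.1, by rw [htake]; exact hr.2⟩)
    rw [show X.length + (M' ++ [w]).length = (X.length + M'.length) + 1 by simp; omega]
    rw [hnoop]
    have hih := ih X (w :: Y) f
      (fun p v hp => by
        have hplen : p < M'.length := by
          by_contra hge
          rw [List.getElem?_eq_none (by omega)] at hp; simp at hp
        have h2 := h p v (by rw [List.getElem?_append_left hplen]; exact hp)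
        rcases h2 with hl | hr
        · exact Or.inl hl
        · refine Or.inr ⟨hr.1, ?_⟩
          rw [show (M' ++ [w]).take p = M'.take p by rw [List.take_append_of_le_length (by omega)]] at hr
          exact hr.2)
      (by simp at hf; omega)
    rw [hGeq, hih]
    congr 1
    simp only [List.length_append, List.length_cons, List.length_nil]
    omega


-- ---- helpers for the main simulation ----

theorem pvInsertMid {α : Type} (w : α) : ∀ (P R : List α), (P ++ R).insertIdx P.length w = P ++ w :: R := by
  intro P
  induction P with
  | nil => intro R; simp
  | cons x xs ih => intro R; rw [List.cons_append, List.length_cons, List.insertIdx_succ_cons, ih, List.cons_append]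

theorem pvFindAt : ∀ (pre : List (Nat × Nat)) (i r : Nat) (post : List (Nat × Nat)), (∀ p ∈ pre, p.1 ≠ i) →
    (pre ++ (i, r) :: post).find? (fun q => q.1 = i) = some (i, r) := by
  intro pre
  induction pre with
  | nil => intro i r post _; simp
  | cons hd tl ih =>
    intro i r post h
    rw [List.cons_append, List.find?_cons_of_neg (by simp [h hd (by simp)])]
    exact ih i r post (fun p hp => h p (by simp [hp]))

theorem pvFindUpd : ∀ (pre : List (Nat × Nat)) (i r r' : Nat) (post : List (Nat × Nat)) (t : Nat), t ≠ i →
    (pre ++ (i, r) :: post).find? (fun q => q.1 = t) = (pre ++ (i, r') :: post).find? (fun q => q.1 = t) := by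
  intro pre
  induction pre with
  | nil =>
    intro i r r' post t ht
    rw [List.nil_append, List.nil_append, List.find?_cons_of_neg (by simp; omega), List.find?_cons_of_neg (by simp; omega)]
  | cons hd tl ih =>
    intro i r r' post t ht
    rw [List.cons_append, List.cons_append]
    by_cases hp : hd.1 = t
    · rw [List.find?_cons_of_pos (by simp [hp]), List.find?_cons_of_pos (by simp [hp])]
    · rw [List.find?_cons_of_neg (by simp [hp]), List.find?_cons_of_neg (by simp [hp])]
      exact ih i r r' post t ht

theorem pvSplitOfMem : ∀ (free : List (Nat × Nat)) (k : Nat), k ∈ free.map Prod.fst →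
    ∃ pre r post, free = pre ++ (k, r) :: post := by
  intro free
  induction free with
  | nil => intro k h; simp at h
  | cons hd tl ih =>
    intro k h
    obtain ⟨i0, r0⟩ := hd
    by_cases he : i0 = k
    · subst he; exact ⟨[], r0, tl, by simp⟩
    · have : k ∈ tl.map Prod.fst := by
        simp at h
        rcases h with h | ⟨x, hx⟩
        · omega
        · exact List.mem_map_of_mem hx
      obtain ⟨pre, r, post, hp⟩ := ih k this
      exact ⟨(i0, r0) :: pre, r, post, by simp [hp]⟩

theorem pvSortedSplit (pre : List (Nat × Nat)) (i r : Nat) (post : List (Nat × Nat))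
    (hs : ((pre ++ (i, r) :: post).map Prod.fst).Pairwise (· < ·)) :
    (∀ p ∈ pre, p.1 < i) ∧ (∀ p ∈ post, i < p.1) := by
  rw [List.map_append, List.pairwise_append] at hs
  obtain ⟨h1, h2, h3⟩ := hs
  rw [List.map_cons, List.pairwise_cons] at h2
  constructor
  · intro p hp
    exact h3 p.1 (List.mem_map_of_mem hp) i (by simp)
  · intro p hp
    exact h2.1 p.1 (List.mem_map_of_mem hp)

theorem pvPgCount (placed : List (Nat × String × Nat)) (t : Nat) (h : ∀ q ∈ placed, q.2.1 ≠ ".") :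
    ∀ v ∈ (placed.filter (fun p => p.1 = t)).map (fun p => List.replicate p.2.2 p.2.1), v.count "." = 0 := by
  intro v hv
  rw [List.mem_map] at hv
  obtain ⟨q, hq, rfl⟩ := hv
  rw [List.count_replicate]
  simp [h q (List.mem_of_mem_filter hq)]

theorem pvLenLeSum : ∀ (l : List (Nat × String × Nat)), (∀ q ∈ l, 1 ≤ q.2.2) →
    l.length ≤ (l.map (fun q => q.2.2)).sum := by
  intro l
  induction l with
  | nil => simp
  | cons hd tl ih =>
    intro h
    simp only [List.length_cons, List.map_cons, List.sum_cons]
    have h1 := h hd (by simp)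
    have h2 := ih (fun q hq => h q (by simp [hq]))
    omega

theorem pvRender_congr (f f' : List (Nat × Nat)) (p p' : List (Nat × String × Nat)) (m m' : List Nat) :
    ∀ (xs : List (String × Nat)) (i : Nat),
    (∀ j lab2 ln2, xs[j]? = some (lab2, ln2) → pvSlotRender f p m (i + j) lab2 ln2 = pvSlotRender f' p' m' (i + j) lab2 ln2) →
    pvRender f p m i xs = pvRender f' p' m' i xs := by
  intro xs
  induction xs with
  | nil => intro i h; rfl
  | cons hd tl ih =>
    intro i h
    obtain ⟨lab, ln⟩ := hd
    rw [pvRender, pvRender]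
    congr 1
    · have := h 0 lab ln (by simp)
      simpa using this
    · exact ih (i + 1) (fun j lab2 ln2 hj => by
        have := h (j + 1) lab2 ln2 (by simpa using hj)
        rwa [show i + (j + 1) = (i + 1) + j by omega] at this)

theorem pvSlot_update (pre : List (Nat × Nat)) (i r r' : Nat) (post : List (Nat × Nat))
    (placed : List (Nat × String × Nat)) (moved : List Nat) (lab : String) (ln knew t : Nat)
    (lab2 : String) (ln2 : Nat) (hti : t ≠ i) (htk : t ≠ knew) :
    pvSlotRender (pre ++ (i, r') :: post) (placed ++ [(i, lab, ln)]) (moved ++ [knew]) t lab2 ln2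
      = pvSlotRender (pre ++ (i, r) :: post) placed moved t lab2 ln2 := by
  rw [pvSlotRender, pvSlotRender]
  by_cases h2 : lab2 = "."
  · rw [if_pos h2, if_pos h2]
    congr 1
    · congr 1
      rw [List.filter_append]
      simp [Ne.symm hti]
    · rw [← pvFindUpd pre i r r' post t hti]
  · rw [if_neg h2, if_neg h2]
    have hc : (moved ++ [knew]).contains t = moved.contains t := by
      simp
      exact fun h => absurd h htk
    rw [hc]

theorem pvPlacedLen_update (placed : List (Nat × String × Nat)) (i : Nat) (lab : String) (ln t : Nat) :
    pvPlacedLen (placed ++ [(i, lab, ln)]) t = pvPlacedLen placed t + (if i = t then ln else 0) := by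
  rw [pvPlacedLen, pvPlacedLen, List.filter_append]
  by_cases h : i = t <;> simp [h]

-- ---- the main simulation ----

theorem pvMain (segs : List (String × Nat)) (hWF : ∀ p ∈ segs, 1 ≤ p.2) :
    ∀ (k : Nat) (free : List (Nat × Nat)) (placed : List (Nat × String × Nat)) (moved : List Nat) (fuel : Nat),
    pvInv segs k free placed moved →
    pvLens (segs.take k) + 2 ≤ fuel →
    k ≤ segs.length →
    pvALoop fuel (pvRender free placed moved 0 segs) (((pvRender free placed moved 0 (segs.take k)).length : Nat) : Int)
      = (pvRender (pvBLoop segs k free placed moved).1 (pvBLoop segs k free placed moved).2.1 (pvBLoop segs k free placed moved).2.2 0 segs) := by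
  intro k
  induction k with
  | zero =>
    intro free placed moved fuel hinv hfuel hk
    obtain ⟨f, rfl⟩ : ∃ f, fuel = f + 2 := ⟨fuel - 2, by omega⟩
    rw [List.take_zero]
    rw [show pvBLoop segs 0 free placed moved = (free, placed, moved) from rfl]
    have hneg : ¬ ((0:Int) ≤ -1) := by norm_num
    have hm1 : ((List.length (pvRender free placed moved 0 ([] : List (String × Nat))) : Nat) : Int) - 1 = (-1 : Int) := by
      simp [pvRender]
    simp only [pvALoop]
    rw [if_pos (by simp [pvRender]), hm1, PySem.List.pyGet?_neg_one]
    cases hg : (pvRender free placed moved 0 segs).getLast? with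
    | none => rfl
    | some g =>
      simp only []
      by_cases hc : g.count "." ≠ 0
      · rw [if_pos hc, if_neg hneg]
      · rw [if_neg hc]
        rw [pvFindMove_none g.length (-1) _ 0 (fun m w hm hlt => absurd hlt (by omega))]
        simp only []
        rw [if_neg hneg]
  | succ k ih =>
    intro free placed moved fuel hinv hfuel hklen
    obtain ⟨hC1, hC2, hC3, hC4, hC6⟩ := hinv
    have hkl : k < segs.length := by omega
    cases hget : segs[k]? with
    | none => exact absurd hget (by simp [hkl])
    | some p0 =>
    obtain ⟨lab, ln⟩ := p0
    have hgetE : segs[k] = (lab, ln) := by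
      have := List.getElem?_eq_getElem hkl
      rw [this] at hget
      exact Option.some_inj.1 hget
    have hln : 1 ≤ ln := by
      have : (lab, ln) ∈ segs := by rw [← hgetE]; exact List.getElem_mem hkl
      exact hWF _ this
    have hsort : (free.map Prod.fst).Pairwise (· < ·) := by rw [hC1]; exact pvFreeIdx_pairwise segs 0
    have hT : segs.take (k+1) = segs.take k ++ [(lab, ln)] := by
      rw [List.take_succ_eq_append_getElem hkl, hgetE]
    have hlenT : (segs.take k).length = k := by simp [List.length_take]; omega
    have hD : segs = segs.take (k+1) ++ segs.drop (k+1) := (List.take_append_drop _ _).symm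
    have hLT : pvLens (segs.take (k+1)) = pvLens (segs.take k) + ln := by
      rw [hT, pvLens_append]; simp [pvLens]
    have hG : pvRender free placed moved 0 segs
        = pvRender free placed moved 0 (segs.take k) ++ (pvSlotRender free placed moved k lab ln ++ pvRender free placed moved (k+1) (segs.drop (k+1))) := by
      conv_lhs => rw [hD, hT, List.append_assoc, pvRender_append, pvRender_append]
      simp [pvRender, hlenT]
    have hXS : pvRender free placed moved 0 (segs.take (k+1))
        = pvRender free placed moved 0 (segs.take k) ++ pvSlotRender free placed moved k lab ln := by
      rw [hT, pvRender_append]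
      simp [pvRender, hlenT]
    set X := pvRender free placed moved 0 (segs.take k) with hXdef
    set Z := pvRender free placed moved (k+1) (segs.drop (k+1)) with hZdef
    set S := pvSlotRender free placed moved k lab ln with hSdef
    by_cases hlab : lab = "."
    · -- free slot: every group of its render is a no-op for A; B skips it
      have hkmem : k ∈ free.map Prod.fst := by
        rw [hC1]
        rw [mem_pvFreeIdx]
        exact ⟨by omega, ln, by simpa [hlab] using hget⟩
      obtain ⟨pre, r, post, hfree⟩ := pvSplitOfMem free k hkmem
      have hbounds := pvSortedSplit pre k r post (hfree ▸ hsort)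
      have hfind : free.find? (fun q => q.1 = k) = some (k, r) := by
        rw [hfree]; exact pvFindAt pre k r post (fun p hp => by have := hbounds.1 p hp; omega)
      have hS : S = (placed.filter (fun p => p.1 = k)).map (fun p => List.replicate p.2.2 p.2.1)
          ++ (if r = 0 then [] else [pvDots r]) := by
        rw [hSdef, pvSlotRender, if_pos hlab]
        simp only [hfind]
      set pg := (placed.filter (fun p => p.1 = k)).map (fun p => List.replicate p.2.2 p.2.1) with hpgdef
      have hC6k : pvPlacedLen placed k + r ≤ ln := by
        refine hC6 (k, r) (by rw [hfree]; simp) ln ?_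
        simpa [hlab] using hget
      have hpglen : pg.length ≤ pvPlacedLen placed k := by
        rw [hpgdef, List.length_map, pvPlacedLen]
        exact pvLenLeSum _ (fun q hq => (hC3 q (List.mem_of_mem_filter hq)).2)
      have hSlen : S.length ≤ ln := by
        rw [hS]
        by_cases hr : r = 0 <;> simp [hr] <;> omega
      have hcond : ∀ p w, S[p]? = some w → w.count "." ≠ 0 ∨ (1 ≤ w.length ∧ ∀ v ∈ X ++ S.take p, v.count "." < w.length) := by
        intro p w hp
        rw [hS] at hp
        by_cases hplt : p < pg.length
        · rw [List.getElem?_append_left hplt] at hp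
          have hwpg : w ∈ pg := List.mem_of_getElem? hp
          obtain ⟨q, hq, rfl⟩ := List.mem_map.1 hwpg
          have hqmem := List.mem_of_mem_filter hq
          have hqk : q.1 = k := by have := List.mem_filter.1 hq; simpa using this.2
          refine Or.inr ⟨by simp [(hC3 q hqmem).2], ?_⟩
          intro v hv
          rw [List.length_replicate]
          rcases List.mem_append.1 hv with hv | hv
          · refine pvRender_count_lt free placed moved q.2.2 (hC3 q hqmem).2 (segs.take k) 0
              (fun q' hq' => (hC3 q' hq').1)
              (fun t ht hcnd => by have := hC4 t ht; rw [hlenT] at hcnd; omega)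
              (fun p' hp' h1 h2 => by
                rw [hlenT] at h2
                exact hC2 p' hp' q hqmem (by omega))
              v hv
          · have hvpg : v ∈ pg := by
              have hsub : S.take p ⊆ pg := by
                rw [hS, List.take_append_of_le_length (by omega)]
                exact List.take_subset _ _
              exact hsub hv
            have := pvPgCount placed k (fun q' hq' => (hC3 q' hq').1) v (hpgdef ▸ hvpg)
            have hq2 := (hC3 q hqmem).2
            omega
        · rw [List.getElem?_append_right (by omega)] at hp
          by_cases hr : r = 0
          · rw [hr] at hp; simp at hp
          · rw [if_neg hr] at hp
            have : p - pg.length = 0 := by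
              by_contra hne
              rw [List.getElem?_eq_none (by simp; omega)] at hp
              simp at hp
            rw [this] at hp
            simp at hp
            rw [← hp, pvDots, List.count_replicate]
            left
            simpa using hr
      have hflen : S.length ≤ fuel := by omega
      have hcross := pvCross S X Z fuel hcond hflen
      rw [hXS, List.length_append, hG, ← List.append_assoc, hcross]
      have hBL : pvBLoop segs (k+1) free placed moved = pvBLoop segs k free placed moved := by
        simp only [pvBLoop, hget, if_pos hlab]
      rw [hBL]
      rw [List.append_assoc, ← hG]
      exact ih free placed moved (fuel - S.length)
        ⟨hC1, hC2, hC3, fun m hm => by have := hC4 m hm; omega, hC6⟩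
        (by omega) (by omega)
    · -- file slot
      have hknm : moved.contains k = false := by
        by_contra hcm
        simp at hcm
        have := hC4 k hcm
        omega
      have hSfile : S = [List.replicate ln lab] := by
        rw [hSdef, pvSlotRender, if_neg hlab, hknm]
        simp
      obtain ⟨f, rfl⟩ : ∃ f, fuel = f + 1 := ⟨fuel - 1, by omega⟩
      have hGx : pvRender free placed moved 0 segs = X ++ List.replicate ln lab :: Z := by
        rw [hG, hSfile]; simp
      have hXS1 : (pvRender free placed moved 0 (segs.take (k+1))).length = X.length + 1 := by
        rw [hXS, hSfile]; simp
      have h0 : (0:Int) ≤ ((X.length + 1 : Nat) : Int) := by positivity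
      have hk1 : ((X.length + 1 : Nat) : Int) - 1 = ((X.length : Nat) : Int) := by push_cast; ring
      have hget2 : PySem.List.pyGet? (pvRender free placed moved 0 segs) ((X.length : Nat) : Int) = some (List.replicate ln lab) := by
        rw [hGx]
        exact PySem.List.pyGet?_append_length X _ _
      have hcount : (List.replicate ln lab).count "." = 0 := by
        rw [List.count_replicate]; simp [hlab]
      rw [hXS1]
      simp only [pvALoop]
      rw [if_pos h0, hk1, hget2]
      simp only []
      rw [if_neg (by simp [hcount])]
      rw [List.length_replicate]
      cases hcl : (pvClaim free k ln).2 with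
      | none =>
        have hspec := pvClaimNone k ln free hsort hcl
        have hfm : pvFindMove (pvRender free placed moved 0 segs) ln ((X.length : Nat) : Int) 0 = none := by
          apply pvFindMove_none
          intro m w hm hlt
          have hmX : m < X.length := by push_cast at hlt; omega
          have hwX : w ∈ X := by
            rw [hGx, List.getElem?_append_left hmX] at hm
            exact List.mem_of_getElem? hm
          exact pvRender_count_lt free placed moved ln hln (segs.take k) 0
            (fun q' hq' => (hC3 q' hq').1)
            (fun t ht hcnd => by have := hC4 t ht; rw [hlenT] at hcnd; omega)
            (fun p' hp' h1 h2 => hspec.2 p' hp' (by rw [hlenT] at h2; omega))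
            w hwX
        rw [hfm]
        have hBL : pvBLoop segs (k+1) free placed moved = pvBLoop segs k free placed moved := by
          simp only [pvBLoop, hget, if_neg hlab, hcl, hspec.1]
        rw [hBL]
        exact ih free placed moved f
          ⟨hC1, hC2, hC3, fun m hm => by have := hC4 m hm; omega, hC6⟩
          (by omega) (by omega)
      | some i =>
        obtain ⟨pre, r, post, hfree, hfree', hlr, hik, hpre⟩ := pvClaimSome k ln free i hcl
        have hbounds := pvSortedSplit pre i r post (hfree ▸ hsort)
        have hpmem : ∀ p ∈ free, p.1 < i → p ∈ pre := by
          intro p hp hpi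
          rw [hfree] at hp
          rcases List.mem_append.1 hp with h | h
          · exact h
          · rcases List.mem_cons.1 h with rfl | h
            · exact absurd hpi (by simp)
            · have := hbounds.2 p h; omega
        have himem : i ∈ pvFreeIdx 0 segs := by
          rw [← hC1, hfree]; simp
        obtain ⟨-, L0, hseg_i⟩ := (mem_pvFreeIdx segs 0 i).1 himem
        rw [Nat.sub_zero] at hseg_i
        have hilen : i < segs.length := by omega
        have hsegiE : segs[i] = (".", L0) := by
          have := List.getElem?_eq_getElem hilen
          rw [this] at hseg_i
          exact Option.some_inj.1 hseg_i
        have hTi : segs.take k = (segs.take k).take i ++ ((".", L0) :: (segs.take k).drop (i+1)) := by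
          conv_lhs => rw [← List.take_append_drop i (segs.take k)]
          congr 1
          rw [List.drop_eq_getElem_cons (by omega)]
          congr 1
          rw [List.getElem_take]
          exact hsegiE
        have hlenTi : ((segs.take k).take i).length = i := by simp; omega
        have hlenTd : ((segs.take k).drop (i+1)).length = k - (i+1) := by simp; omega
        have hfind_i : free.find? (fun q => q.1 = i) = some (i, r) := by
          rw [hfree]; exact pvFindAt pre i r post (fun p hp => by have := hbounds.1 p hp; omega)
        have hr0 : r ≠ 0 := by omega
        set pg := (placed.filter (fun p => p.1 = i)).map (fun p => List.replicate p.2.2 p.2.1) with hpgdef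
        have hXsplit : ∀ (F : List (Nat × Nat)) (P : List (Nat × String × Nat)) (M : List Nat),
            pvRender F P M 0 (segs.take k)
              = pvRender F P M 0 ((segs.take k).take i) ++ (pvSlotRender F P M i "." L0 ++ pvRender F P M (i+1) ((segs.take k).drop (i+1))) := by
          intro F P M
          conv_lhs => rw [hTi, pvRender_append]
          simp [pvRender, hlenTi]
        have hSi : pvSlotRender free placed moved i "." L0 = pg ++ [pvDots r] := by
          rw [pvSlotRender, if_pos rfl]
          simp only [hfind_i]
          rw [if_neg hr0]
        set X1 := pvRender free placed moved 0 ((segs.take k).take i) with hX1def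
        set X2 := pvRender free placed moved (i+1) ((segs.take k).drop (i+1)) with hX2def
        have hXeq : X = X1 ++ (pg ++ [pvDots r] ++ X2) := by
          rw [hXdef, hXsplit free placed moved, hSi]
        have hXlen2 : X.length = X1.length + pg.length + 1 + X2.length := by
          rw [hXeq]; simp only [List.length_append, List.length_cons, List.length_nil]; omega
        have hGfull : pvRender free placed moved 0 segs
            = (X1 ++ pg) ++ pvDots r :: (X2 ++ List.replicate ln lab :: Z) := by
          rw [hGx, hXeq]; simp
        have hP : ∀ v ∈ X1 ++ pg, v.count "." < ln := by
          intro v hv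
          rcases List.mem_append.1 hv with hv | hv
          · refine pvRender_count_lt free placed moved ln hln ((segs.take k).take i) 0
              (fun q' hq' => (hC3 q' hq').1)
              (fun t ht hcnd => by have := hC4 t ht; rw [hlenTi] at hcnd; omega)
              (fun p' hp' h1 h2 => by
                rw [hlenTi] at h2
                exact (hpre p' (hpmem p' hp' (by omega))).2)
              v hv
          · have := pvPgCount placed i (fun q' hq' => (hC3 q' hq').1) v hv
            omega
        have hgcnt : ln ≤ (pvDots r).count "." := by
          rw [pvDots, List.count_replicate]; simpa using hlr
        have hfound := pvFindMove_found (pvDots r) ln ((X.length : Nat) : Int) (X1 ++ pg)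
          (X2 ++ List.replicate ln lab :: Z) 0 hP hgcnt
          (by push_cast; simp only [List.length_append]; omega)
        rw [hGfull, hfound]
        simp only []
        have hdl : (pvDots r).length = r := by simp [pvDots]
        have htn : (((X.length : Nat) : Int)).toNat = X.length := by simp
        -- the new state after the move
        set F' := pre ++ (i, r - ln) :: post with hF'def
        set P' := placed ++ [(i, lab, ln)] with hP'def
        set M' := moved ++ [k] with hM'def
        have hcong : ∀ t lab2 ln2, t ≠ i → t ≠ k →
            pvSlotRender F' P' M' t lab2 ln2 = pvSlotRender free placed moved t lab2 ln2 := by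
          intro t lab2 ln2 hti htk
          rw [hfree]
          exact pvSlot_update pre i r (r - ln) post placed moved lab ln k t lab2 ln2 hti htk
        have hX1' : pvRender F' P' M' 0 ((segs.take k).take i) = X1 := by
          rw [hX1def]
          refine pvRender_congr _ _ _ _ _ _ _ 0 (fun j lab2 ln2 hj => ?_)
          obtain ⟨hjl, -⟩ := List.getElem?_eq_some_iff.1 hj
          rw [hlenTi] at hjl
          exact hcong (0 + j) lab2 ln2 (by omega) (by omega)
        have hX2' : pvRender F' P' M' (i+1) ((segs.take k).drop (i+1)) = X2 := by
          rw [hX2def]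
          refine pvRender_congr _ _ _ _ _ _ _ (i+1) (fun j lab2 ln2 hj => ?_)
          obtain ⟨hjl, -⟩ := List.getElem?_eq_some_iff.1 hj
          rw [hlenTd] at hjl
          exact hcong ((i+1) + j) lab2 ln2 (by omega) (by omega)
        have hZ' : pvRender F' P' M' (k+1) (segs.drop (k+1)) = Z := by
          rw [hZdef]
          refine pvRender_congr _ _ _ _ _ _ _ (k+1) (fun j lab2 ln2 hj => ?_)
          exact hcong ((k+1) + j) lab2 ln2 (by omega) (by omega)
        have hSk' : pvSlotRender F' P' M' k lab ln = [pvDots ln] := by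
          rw [pvSlotRender, if_neg hlab]
          have : M'.contains k = true := by rw [hM'def]; simp
          rw [this]
          simp
        have hfind_i' : F'.find? (fun q => q.1 = i) = some (i, r - ln) := by
          rw [hF'def]; exact pvFindAt pre i (r - ln) post (fun p hp => by have := hbounds.1 p hp; omega)
        have hSi' : pvSlotRender F' P' M' i "." L0
            = pg ++ List.replicate ln lab :: (if r - ln = 0 then [] else [pvDots (r - ln)]) := by
          rw [pvSlotRender, if_pos rfl]
          simp only [hfind_i']
          rw [hP'def, List.filter_append, List.map_append]
          simp only [List.filter_cons, List.filter_nil]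
          rw [if_pos (by simp)]
          simp [hpgdef]
        have hG' : pvRender F' P' M' 0 segs
            = X1 ++ (pg ++ List.replicate ln lab :: (if r - ln = 0 then [] else [pvDots (r - ln)])) ++ X2 ++ (pvDots ln :: Z) := by
          have h1 : pvRender F' P' M' 0 segs
              = pvRender F' P' M' 0 (segs.take k) ++ (pvSlotRender F' P' M' k lab ln ++ pvRender F' P' M' (k+1) (segs.drop (k+1))) := by
            conv_lhs => rw [hD, hT, List.append_assoc, pvRender_append, pvRender_append]
            simp [pvRender, hlenT]
          rw [h1, hXsplit F' P' M', hX1', hX2', hZ', hSk', hSi']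
          simp [List.append_assoc]
        have hlenTk' : (pvRender F' P' M' 0 (segs.take k)).length
            = X1.length + (pg.length + 1 + (if r - ln = 0 then 0 else 1)) + X2.length := by
          rw [hXsplit F' P' M', hX1', hX2', hSi']
          split <;> (simp only [List.length_append, List.length_cons, List.length_nil]; omega)
        -- new invariant
        have hInv' : pvInv segs k F' P' M' := by
          refine ⟨?_, ?_, ?_, ?_, ?_⟩
          · rw [hF'def, ← hC1, hfree]; simp
          · intro p hp q hq hpq
            rcases List.mem_append.1 hq with hq | hq
            · have hpfree : (p.1, p.2) ∈ free ∨ (p = (i, r - ln) ∧ (i, r) ∈ free) := by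
                rw [hF'def] at hp
                rcases List.mem_append.1 hp with h | h
                · left; rw [hfree]; simpa using Or.inl h
                · rcases List.mem_cons.1 h with rfl | h
                  · right; exact ⟨rfl, by rw [hfree]; simp⟩
                  · left; rw [hfree]; simp [h]
              rcases hpfree with h | ⟨rfl, h⟩
              · exact hC2 p (by simpa using h) q hq hpq
              · have := hC2 (i, r) h q hq (by simpa using hpq)
                simp at this ⊢
                omega
            · rcases List.mem_cons.1 hq with rfl | h
              · simp only at hpq ⊢
                have hppre : p ∈ pre := by
                  rw [hF'def] at hp
                  rcases List.mem_append.1 hp with h | h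
                  · exact h
                  · rcases List.mem_cons.1 h with rfl | h
                    · exact absurd hpq (by simp)
                    · have := hbounds.2 p h; omega
                exact (hpre p hppre).2
              · simp at h
          · intro q hq
            rcases List.mem_append.1 hq with hq | hq
            · exact hC3 q hq
            · rcases List.mem_cons.1 hq with rfl | h
              · exact ⟨hlab, hln⟩
              · simp at h
          · intro m hm
            rw [hM'def] at hm
            rcases List.mem_append.1 hm with hm | hm
            · have := hC4 m hm; omega
            · rcases List.mem_cons.1 hm with rfl | h
              · omega
              · simp at h
          · intro p hp L hL
            rw [hP'def, pvPlacedLen_update]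
            rw [hF'def] at hp
            rcases List.mem_append.1 hp with h | h
            · have hpi : p.1 < i := hbounds.1 p h
              rw [if_neg (by omega)]
              exact hC6 p (by rw [hfree]; simp [h]) L hL
            · rcases List.mem_cons.1 h with rfl | h
              · have := hC6 (i, r) (by rw [hfree]; simp) L hL
                simp at this ⊢
                omega
              · have hpi : i < p.1 := hbounds.2 p h
                rw [if_neg (by omega)]
                exact hC6 p (by rw [hfree]; simp [h]) L hL
        by_cases hreq : r - ln = 0
        · rw [hdl, if_neg (by omega)]
          have hset1 : (((X1 ++ pg) ++ pvDots r :: (X2 ++ List.replicate ln lab :: Z)).set (0 + (X1 ++ pg).length) (List.replicate ln lab))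
              = (X1 ++ pg) ++ List.replicate ln lab :: (X2 ++ List.replicate ln lab :: Z) := by
            simp
          rw [hset1, htn]
          have hset2 : (((X1 ++ pg) ++ List.replicate ln lab :: (X2 ++ List.replicate ln lab :: Z)).set X.length (pvDots ln))
              = (X1 ++ pg) ++ List.replicate ln lab :: (X2 ++ pvDots ln :: Z) := by
            have hre : (X1 ++ pg) ++ List.replicate ln lab :: (X2 ++ List.replicate ln lab :: Z)
                = ((X1 ++ pg) ++ List.replicate ln lab :: X2) ++ List.replicate ln lab :: Z := by simp
            have hXlen3 : X.length = ((X1 ++ pg) ++ List.replicate ln lab :: X2).length := by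
              simp only [List.length_append, List.length_cons]
              omega
            rw [hre, hXlen3]
            simp
          rw [hset2]
          have hihres := ih F' P' M' f hInv' (by omega) (by omega)
          rw [hlenTk', if_pos hreq] at hihres
          rw [show X1.length + (pg.length + 1 + 0) + X2.length = X.length by omega] at hihres
          have hGR : pvRender F' P' M' 0 segs = (X1 ++ pg) ++ List.replicate ln lab :: (X2 ++ pvDots ln :: Z) := by
            rw [hG', if_pos hreq]
            simp
          rw [hGR] at hihres
          rw [hihres]
          have hBL : pvBLoop segs (k+1) free placed moved = pvBLoop segs k F' P' M' := by
            simp only [pvBLoop, hget, if_neg hlab, hcl, hfree', hF'def, hP'def, hM'def]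
          rw [hBL]
        · rw [hdl, if_pos (by omega)]
          have hset1 : (((X1 ++ pg) ++ pvDots r :: (X2 ++ List.replicate ln lab :: Z)).set (0 + (X1 ++ pg).length) (pvDots (r - ln)))
              = (X1 ++ pg) ++ pvDots (r - ln) :: (X2 ++ List.replicate ln lab :: Z) := by
            simp
          rw [hset1]
          have hins : (((X1 ++ pg) ++ pvDots (r - ln) :: (X2 ++ List.replicate ln lab :: Z)).insertIdx (0 + (X1 ++ pg).length) (List.replicate ln lab))
              = (X1 ++ pg) ++ List.replicate ln lab :: pvDots (r - ln) :: (X2 ++ List.replicate ln lab :: Z) := by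
            rw [show (0 + (X1 ++ pg).length) = (X1 ++ pg).length by omega]
            exact pvInsertMid _ _ _
          rw [hins, htn]
          have hset2 : (((X1 ++ pg) ++ List.replicate ln lab :: pvDots (r - ln) :: (X2 ++ List.replicate ln lab :: Z)).set (X.length + 1) (pvDots ln))
              = (X1 ++ pg) ++ List.replicate ln lab :: pvDots (r - ln) :: (X2 ++ pvDots ln :: Z) := by
            have hre : (X1 ++ pg) ++ List.replicate ln lab :: pvDots (r - ln) :: (X2 ++ List.replicate ln lab :: Z)
                = ((X1 ++ pg) ++ List.replicate ln lab :: pvDots (r - ln) :: X2) ++ List.replicate ln lab :: Z := by simp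
            have hXlen3 : X.length + 1 = ((X1 ++ pg) ++ List.replicate ln lab :: pvDots (r - ln) :: X2).length := by
              simp only [List.length_append, List.length_cons]
              omega
            rw [hre, hXlen3]
            simp
          rw [hset2]
          have hihres := ih F' P' M' f hInv' (by omega) (by omega)
          rw [hlenTk', if_neg hreq] at hihres
          rw [show ((X1.length + (pg.length + 1 + 1) + X2.length : Nat) : Int) = ((X.length : Nat) : Int) + 1 by push_cast; omega] at hihres
          have hGR : pvRender F' P' M' 0 segs = (X1 ++ pg) ++ List.replicate ln lab :: pvDots (r - ln) :: (X2 ++ pvDots ln :: Z) := by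
            rw [hG', if_neg hreq]
            simp
          rw [hGR] at hihres
          rw [hihres]
          have hBL : pvBLoop segs (k+1) free placed moved = pvBLoop segs k F' P' M' := by
            simp only [pvBLoop, hget, if_neg hlab, hcl, hfree', hF'def, hP'def, hM'def]
          rw [hBL]


-- ===== VERDICT (by name: the statement is the Claim_ definition above) =====
theorem compact2_spec : Claim_equal_compact2 := by
  intro data _ _
  unfold Spec_compact2 compact2 compact2_alt
  have hWF := pvSegs_wf data
  have hmain := pvMain (pvSegs data) hWF (pvSegs data).length (pvFreeInit 0 (pvSegs data)) [] []
      (2 * data.length + 4) ?_ ?_ (le_refl _)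
  · rw [List.take_length, ← pvRender_init] at hmain
    show (pvALoop (2 * data.length + 4) (pvGroupby data) ((pvGroupby data).length : Int)).flatten = _
    rw [hmain, pvOutFrom_eq_flatten]
  · refine ⟨pvFreeInit_map_fst _ 0, by simp, by simp, by simp, ?_⟩
    intro p hp L hL
    have h2 := (mem_pvFreeInit _ 0 p).1 hp
    simp only [Nat.sub_zero] at h2
    rw [h2.2] at hL
    simp only [Option.some.injEq, Prod.mk.injEq] at hL
    simp [pvPlacedLen, hL.2]
  · rw [List.take_length, pvLens_segs]; omega
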